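-- pv_equiv track=rewrite | github.com/arturoornelasb/tibia-bonelord-469-cipher | deep_checkerboard.py | find_consistent_tokenizations
-- ===== SOURCE A (Python) =====
-- def find_consistent_tokenizations(text, target_len, max_tok_len=3):
--     """Find tokenizations where same token always maps to same letter."""
--     plain = "BEAWITTHANBEAFOOL"
--     results = []
--
--     def backtrack(pos, token_idx, mapping, reverse_map, tokens):
--         if token_idx == target_len:
--             if pos == len(text):
--                 results.append((list(tokens), dict(mapping), {k: set(v) for k, v in reverse_map.items()}))
--             return
--         if pos >= len(text):
--             return
--
--         remaining_chars = len(text) - pos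
--         remaining_tokens = target_len - token_idx
--         if remaining_chars < remaining_tokens or remaining_chars > remaining_tokens * max_tok_len:
--             return
--
--         letter = plain[token_idx]
--
--         for l in range(1, min(max_tok_len + 1, remaining_chars + 1)):
--             tok = text[pos:pos+l]
--             # Check consistency
--             if tok in mapping:
--                 if mapping[tok] != letter:
--                     continue  # Conflict - skip
--             else:
--                 mapping[tok] = letter
--
--             if letter not in reverse_map:
--                 reverse_map[letter] = []
--             reverse_map[letter].append(tok)
--
--             tokens.append(tok)
--             backtrack(pos + l, token_idx + 1, mapping, reverse_map, tokens)
--             tokens.pop()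
--
--             # Undo
--             if mapping.get(tok) == letter and tok not in [t for t in tokens]:
--                 # Only remove if we added it
--                 pass
--             reverse_map[letter].pop()
--             if not reverse_map[letter]:
--                 del reverse_map[letter]
--             if tok in mapping and mapping[tok] == letter:
--                 # Check if this was the one we added
--                 still_used = any(t == tok for t in tokens)
--                 if not still_used:
--                     del mapping[tok]
--
--     # This recursive approach has issues with state management
--     # Let me use a simpler approach
--
--     results_list = []
--     n = len(text)
--
--     def solve(pos, tidx, tok_map, toks):
--         if tidx == target_len:
--             if pos == n:
--                 results_list.append((list(toks), dict(tok_map)))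
--             return
--         if pos >= n:
--             return
--
--         remaining_c = n - pos
--         remaining_t = target_len - tidx
--         if remaining_c < remaining_t or remaining_c > remaining_t * max_tok_len:
--             return
--
--         letter = plain[tidx]
--
--         for l in range(1, min(max_tok_len + 1, remaining_c + 1)):
--             tok = text[pos:pos+l]
--
--             if tok in tok_map:
--                 if tok_map[tok] != letter:
--                     continue
--                 # Already mapped correctly, proceed
--                 toks.append(tok)
--                 solve(pos + l, tidx + 1, tok_map, toks)
--                 toks.pop()
--             else:
--                 tok_map[tok] = letter
--                 toks.append(tok)
--                 solve(pos + l, tidx + 1, tok_map, toks)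
--                 toks.pop()
--                 del tok_map[tok]
--
--     solve(0, 0, {}, [])
--     return results_list
-- ===== SOURCE B (Python) =====
-- def find_consistent_tokenizations(text, target_len, max_tok_len=3):
--     """Find tokenizations where same token always maps to same letter."""
--     plain = "BEAWITTHANBEAFOOL"
--     n = len(text)
--     # Iterative breadth-first search: one level per token index, carrying a
--     # frontier of immutable partial states (pos, tokens, mapping).  At each
--     # level the admissible token-length window is computed arithmetically
--     # so only extendable states are ever created.
--     states = [(0, [], {})]
--     t = 0
--     while t < target_len and states:
--         letter = plain[t]
--         rt = target_len - t
--         nxt = []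
--         for pos, toks, mapping in states:
--             rem = n - pos
--             lo = max(1, rem - (rt - 1) * max_tok_len)
--             hi = min(max_tok_len, rem - (rt - 1))
--             for l in range(lo, hi + 1):
--                 tok = text[pos:pos + l]
--                 if tok in mapping:
--                     if mapping[tok] != letter:
--                         continue
--                     nxt.append((pos + l, toks + [tok], mapping))
--                 else:
--                     nxt.append((pos + l, toks + [tok], {**mapping, tok: letter}))
--         states = nxt
--         t += 1
--     if t != target_len:
--         return []
--     return [(toks, mapping) for pos, toks, mapping in states if pos == n]
-- ===== Notes on version B (the rewrite author's own statement) =====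
-- stated objective: alternative
-- what changed: Replaces A's recursive depth-first backtracking over a shared mutable dict (with undo bookkeeping and a feasibility prune at each call's entry) by an iterative breadth-first search: one loop iteration per token index extends a frontier of immutable (pos, tokens, mapping) states, computing the admissible token-length window arithmetically so infeasible children are never created or recursed into.
-- outside the precondition, e.g. on find_consistent_tokenizations('ABAAAAAAAAAAAAAAAA', 18, 1): A returns [], B returns []
import Mathlib
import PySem

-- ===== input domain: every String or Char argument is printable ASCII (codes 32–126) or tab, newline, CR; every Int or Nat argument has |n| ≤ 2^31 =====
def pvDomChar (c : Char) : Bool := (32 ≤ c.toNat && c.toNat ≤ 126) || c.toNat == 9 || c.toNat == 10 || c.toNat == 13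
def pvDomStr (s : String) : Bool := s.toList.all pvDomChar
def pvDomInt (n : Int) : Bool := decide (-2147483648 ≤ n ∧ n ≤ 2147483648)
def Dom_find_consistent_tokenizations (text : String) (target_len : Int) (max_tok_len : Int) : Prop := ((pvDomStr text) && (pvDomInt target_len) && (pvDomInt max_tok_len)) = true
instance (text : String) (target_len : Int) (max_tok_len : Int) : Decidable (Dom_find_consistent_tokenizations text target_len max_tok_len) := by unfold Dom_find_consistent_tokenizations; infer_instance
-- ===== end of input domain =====

-- B is an ALTERNATIVE implementation: iterative breadth-first frontier (one level per
-- token index, immutable states, arithmetic token-length windows) instead of A's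
-- recursive backtracking over a shared mutable dict; same cost, no speed claim.

-- shared constant of both Pythons: plain = "BEAWITTHANBEAFOOL", and plain[i] as a
-- 1-character string (exact for i < 17; Pre_ keeps both programs inside that range)
def pvPlain : List Char :=
  ['B','E','A','W','I','T','T','H','A','N','B','E','A','F','O','O','L']
def pvLetter (i : Nat) : String := String.ofList [pvPlain.getD i ' ']

-- ===== PORT A =====
-- literal port of A's `solve` (the first, dead `backtrack` helper is never called by A
-- and is not ported).  fuel is only a termination device: each recursive call advances
-- pos by l ≥ 1 and solve returns once pos ≥ n, so fuel = n+1 is never exhausted.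
-- text[pos:pos+l] with 0 ≤ pos, 0 ≤ l is exactly (drop pos).take l (clamping slice);
-- tok_map is the Python dict as an insertion-ordered association list: `tok in tok_map`
-- / `tok_map[tok]` = lookup, `tok_map[tok] = letter` on a missing key appends, and the
-- `del tok_map[tok]` undo is passing the unextended map to the later iterations.
def pvSolveA (cs : List Char) (tl mtl : Int) : Nat → Nat → Nat →
    List (String × String) → List String → List (List String × (List (String × String)))
  | 0, _, _, _, _ => []
  | fuel + 1, pos, tidx, m, toks =>
    if (tidx : Int) = tl then
      (if pos = cs.length then [(toks, m)] else [])
    else if cs.length ≤ pos then []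
    else
      let rc : Int := (cs.length : Int) - pos
      let rt : Int := tl - tidx
      if rc < rt ∨ rt * mtl < rc then []
      else
        let letter := pvLetter tidx
        (PySem.List.pyRange 1 (min (mtl + 1) (rc + 1)) 1).foldl (fun acc l =>
          let tok := String.ofList ((cs.drop pos).take l.toNat)
          match m.lookup tok with
          | some v =>
            if v = letter then
              acc ++ pvSolveA cs tl mtl fuel (pos + l.toNat) (tidx + 1) m (toks ++ [tok])
            else acc
          | none =>
            acc ++ pvSolveA cs tl mtl fuel (pos + l.toNat) (tidx + 1)
              (m ++ [(tok, letter)]) (toks ++ [tok])) []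

def find_consistent_tokenizations (text : String) (target_len : Int) (max_tok_len : Int) :
    List (List String × (List (String × String))) :=
  pvSolveA text.toList target_len max_tok_len (text.toList.length + 1) 0 0 [] []

-- ===== PORT B =====
-- state of B's frontier: (pos, tokens so far, mapping so far)
-- one level of B's while-loop: extend every frontier state by every admissible token
def pvStepB (cs : List Char) (tl mtl : Int) (t : Nat)
    (states : List (Nat × List String × List (String × String))) :
    List (Nat × List String × List (String × String)) :=
  let letter := pvLetter t
  let rt : Int := tl - t
  states.foldl (fun nxt s =>
    let pos : Nat := s.1
    let rem : Int := (cs.length : Int) - pos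
    let lo : Int := max 1 (rem - (rt - 1) * mtl)
    let hi : Int := min mtl (rem - (rt - 1))
    (PySem.List.pyRange lo (hi + 1) 1).foldl (fun nxt2 l =>
      let tok := String.ofList ((cs.drop pos).take l.toNat)
      match s.2.2.lookup tok with
      | some v =>
        if v = letter then nxt2 ++ [(pos + l.toNat, s.2.1 ++ [tok], s.2.2)] else nxt2
      | none =>
        nxt2 ++ [(pos + l.toNat, s.2.1 ++ [tok], s.2.2 ++ [(tok, letter)])]) nxt) []

-- B's `while t < target_len and states:` loop
def pvLoopB (cs : List Char) (tl mtl : Int) (t : Nat)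
    (states : List (Nat × List String × List (String × String))) :
    Nat × List (Nat × List String × List (String × String)) :=
  if h : (t : Int) < tl ∧ states ≠ [] then
    pvLoopB cs tl mtl (t + 1) (pvStepB cs tl mtl t states)
  else (t, states)
termination_by (tl - (t : Int)).toNat
decreasing_by omega

def find_consistent_tokenizations_alt (text : String) (target_len : Int) (max_tok_len : Int) :
    List (List String × (List (String × String))) :=
  let cs := text.toList
  let r := pvLoopB cs target_len max_tok_len 0 [(0, [], [])]
  if (r.1 : Int) ≠ target_len then []
  else r.2.filterMap (fun s => if s.1 = cs.length then some (s.2.1, s.2.2) else none)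

-- ===== PRECONDITION & SPEC =====
-- (The two Lean ports are total and provably equal on every input; Pre_ only marks the
-- region where the PYTHON programs raise and so cannot be compared with the ports.)
-- Pre_ excludes the inputs with 17 < target_len ≤ len(text) ≤ target_len*max_tok_len
-- (except uniform texts with max_tok_len ≤ 10), where A's plain[token_idx] can overrun
-- the 17-letter plaintext: there A raises IndexError whenever some consistent feasible
-- 17-token prefix of text exists, and only returns (the empty list) when every such
-- prefix dies of a mapping conflict first.  (A text of one repeated character with
-- max_tok_len ≤ 10 offers at most 10 distinct tokens, too few for the 11 distinct
-- letters among plain's first 17, so no consistent 17-token prefix and no IndexError.)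
def Pre_find_consistent_tokenizations (text : String) (target_len : Int) (max_tok_len : Int) : Prop :=
  target_len ≤ 17 ∨ PySem.Str.len text ≤ 17 ∨ PySem.Str.len text < target_len ∨
    target_len * max_tok_len < PySem.Str.len text ∨
    ((∀ c ∈ text.toList, c = text.toList.headD ' ') ∧ max_tok_len ≤ 10)
instance (text : String) (target_len : Int) (max_tok_len : Int) :
    Decidable (Pre_find_consistent_tokenizations text target_len max_tok_len) := by
  unfold Pre_find_consistent_tokenizations; infer_instance
def pvWitness_find_consistent_tokenizations : String × Int × Int := ("AB", 2, 3)

def Spec_find_consistent_tokenizations (text : String) (target_len : Int) (max_tok_len : Int) (out : List (List String × (List (String × String)))) : Prop := out = find_consistent_tokenizations_alt text target_len max_tok_len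
instance (text : String) (target_len : Int) (max_tok_len : Int) (out : List (List String × (List (String × String)))) : Decidable (Spec_find_consistent_tokenizations text target_len max_tok_len out) := by unfold Spec_find_consistent_tokenizations; infer_instance

-- ===== CLAIM (what is proved, stated in full; the proofs are below) =====
def Claim_equal_find_consistent_tokenizations : Prop := ∀ (text : String) (target_len : Int) (max_tok_len : Int), Dom_find_consistent_tokenizations text target_len max_tok_len → Pre_find_consistent_tokenizations text target_len max_tok_len → Spec_find_consistent_tokenizations text target_len max_tok_len (find_consistent_tokenizations text target_len max_tok_len)

-- ===== LEMMAS AND PROOFS =====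

-- the admissible token lengths B computes for state s at level t, and the (0 or 1) states
-- a given length l extends s to
def pvWindow (cs : List Char) (tl mtl : Int) (t : Nat)
    (s : Nat × List String × List (String × String)) : List Int :=
  let rem : Int := (cs.length : Int) - s.1
  let rt : Int := tl - t
  PySem.List.pyRange (max 1 (rem - (rt - 1) * mtl)) (min mtl (rem - (rt - 1)) + 1) 1

def pvChild (cs : List Char) (tl mtl : Int) (t : Nat)
    (s : Nat × List String × List (String × String)) (l : Int) :
    List (Nat × List String × List (String × String)) :=
  let tok := String.ofList ((cs.drop s.1).take l.toNat)
  match s.2.2.lookup tok with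
  | some v => if v = pvLetter t then [(s.1 + l.toNat, s.2.1 ++ [tok], s.2.2)] else []
  | none => [(s.1 + l.toNat, s.2.1 ++ [tok], s.2.2 ++ [(tok, pvLetter t)])]

def pvChildren (cs : List Char) (tl mtl : Int) (t : Nat)
    (s : Nat × List String × List (String × String)) :
    List (Nat × List String × List (String × String)) :=
  (pvWindow cs tl mtl t s).flatMap (pvChild cs tl mtl t s)

-- B's step is the in-order concatenation of every state's children
lemma pvStepB_eq (cs : List Char) (tl mtl : Int) (t : Nat) (states : List (Nat × List String × List (String × String))) :
    pvStepB cs tl mtl t states = states.flatMap (pvChildren cs tl mtl t) := by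
  simp only [pvStepB]
  have hinner : ∀ (s : Nat × List String × List (String × String))
      (nxt : List (Nat × List String × List (String × String))),
      (PySem.List.pyRange (max 1 (((cs.length : Int) - s.1) - ((tl - t) - 1) * mtl))
          (min mtl (((cs.length : Int) - s.1) - ((tl - t) - 1)) + 1) 1).foldl (fun nxt2 l =>
        match s.2.2.lookup (String.ofList ((cs.drop s.1).take l.toNat)) with
        | some v =>
          if v = pvLetter t then nxt2 ++ [(s.1 + l.toNat, s.2.1 ++ [String.ofList ((cs.drop s.1).take l.toNat)], s.2.2)] else nxt2
        | none =>
          nxt2 ++ [(s.1 + l.toNat, s.2.1 ++ [String.ofList ((cs.drop s.1).take l.toNat)],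
            s.2.2 ++ [(String.ofList ((cs.drop s.1).take l.toNat), pvLetter t)])]) nxt
        = nxt ++ pvChildren cs tl mtl t s := by
    intro s nxt
    have hb : (fun (nxt2 : List (Nat × List String × List (String × String))) (l : Int) =>
        match s.2.2.lookup (String.ofList ((cs.drop s.1).take l.toNat)) with
        | some v =>
          if v = pvLetter t then nxt2 ++ [(s.1 + l.toNat, s.2.1 ++ [String.ofList ((cs.drop s.1).take l.toNat)], s.2.2)] else nxt2
        | none =>
          nxt2 ++ [(s.1 + l.toNat, s.2.1 ++ [String.ofList ((cs.drop s.1).take l.toNat)],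
            s.2.2 ++ [(String.ofList ((cs.drop s.1).take l.toNat), pvLetter t)])])
        = fun nxt2 l => nxt2 ++ pvChild cs tl mtl t s l := by
      funext nxt2 l
      simp only [pvChild]
      cases hlk : s.2.2.lookup (String.ofList ((cs.drop s.1).take l.toNat)) with
      | none => simp
      | some v => by_cases hv : v = pvLetter t <;> simp [hv]
    rw [hb, PySem.List.foldl_append_eq_flatMap]
    rfl
  have hout : (fun (nxt : List (Nat × List String × List (String × String)))
      (s : Nat × List String × List (String × String)) =>
      (PySem.List.pyRange (max 1 (((cs.length : Int) - s.1) - ((tl - t) - 1) * mtl))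
          (min mtl (((cs.length : Int) - s.1) - ((tl - t) - 1)) + 1) 1).foldl (fun nxt2 l =>
        match s.2.2.lookup (String.ofList ((cs.drop s.1).take l.toNat)) with
        | some v =>
          if v = pvLetter t then nxt2 ++ [(s.1 + l.toNat, s.2.1 ++ [String.ofList ((cs.drop s.1).take l.toNat)], s.2.2)] else nxt2
        | none =>
          nxt2 ++ [(s.1 + l.toNat, s.2.1 ++ [String.ofList ((cs.drop s.1).take l.toNat)],
            s.2.2 ++ [(String.ofList ((cs.drop s.1).take l.toNat), pvLetter t)])]) nxt)
      = fun nxt s => nxt ++ pvChildren cs tl mtl t s := by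
    funext nxt s; exact hinner s nxt
  rw [hout, PySem.List.foldl_append_eq_flatMap]
  rfl

-- dead states: pvSolveA returns [] out of fuel, at the final index off the end, and on
-- infeasible remainders
lemma pvSolveA_dead (cs : List Char) (tl mtl : Int) (fuel pos t : Nat)
    (m : List (String × String)) (toks : List String)
    (h : fuel = 0 ∨ ((t : Int) = tl ∧ pos ≠ cs.length) ∨
      ((t : Int) ≠ tl ∧ ((cs.length : Int) - pos < tl - t ∨ (tl - t) * mtl < (cs.length : Int) - pos))) :
    pvSolveA cs tl mtl fuel pos t m toks = [] := by
  cases fuel with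
  | zero => simp [pvSolveA]
  | succ fuel =>
    rcases h with h | ⟨h1, h2⟩ | ⟨h1, h2⟩
    · exact absurd h (by omega)
    · simp [pvSolveA, h1, h2]
    · simp only [pvSolveA]
      rw [if_neg h1]
      by_cases hp : cs.length ≤ pos
      · simp [hp]
      · rw [if_neg hp, if_pos h2]

-- past the target index (only reachable when target_len < 0) pvSolveA returns []
lemma pvSolveA_gt (cs : List Char) (tl mtl : Int) (fuel pos t : Nat)
    (m : List (String × String)) (toks : List String) (ht : tl < (t : Int)) (hp : pos ≤ cs.length) :
    pvSolveA cs tl mtl fuel pos t m toks = [] := by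
  cases fuel with
  | zero => simp [pvSolveA]
  | succ fuel =>
    simp only [pvSolveA]
    rw [if_neg (by omega : ¬((t : Int) = tl))]
    by_cases hpe : cs.length ≤ pos
    · simp [hpe]
    · rw [if_neg hpe]
      by_cases hpr : ((cs.length : Int) - pos < tl - t ∨ (tl - t) * mtl < (cs.length : Int) - pos)
      · rw [if_pos hpr]
      · rw [if_neg hpr]
        push_neg at hpr
        have hmtl : mtl < 0 := by
          by_contra hm
          push_neg at hm
          have : (tl - t) * mtl ≤ 0 := mul_nonpos_of_nonpos_of_nonneg (by omega) hm
          omega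
        rw [PySem.List.pyRange_one_eq_nil (by omega : min (mtl + 1) (((cs.length : Int) - pos) + 1) ≤ 1)]
        simp

-- one level of A's recursion = expanding through B's children of the state
lemma pvExpand (cs : List Char) (tl mtl : Int) (fuel pos t : Nat)
    (m : List (String × String)) (toks : List String)
    (hp : pos ≤ cs.length) (ht : (t : Int) < tl) :
    pvSolveA cs tl mtl (fuel + 1) pos t m toks =
      (pvChildren cs tl mtl t (pos, toks, m)).flatMap
        (fun s' => pvSolveA cs tl mtl fuel s'.1 (t + 1) s'.2.2 s'.2.1) := by
  have hrt1 : 1 ≤ tl - (t : Int) := by omega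
  simp only [pvSolveA]
  rw [if_neg (by omega : ¬((t : Int) = tl))]
  by_cases hpe : cs.length ≤ pos
  · rw [if_pos hpe]
    have hw : pvWindow cs tl mtl t (pos, toks, m) = [] := by
      unfold pvWindow
      apply PySem.List.pyRange_one_eq_nil
      have h1 : min mtl (((cs.length : Int) - pos) - ((tl - t) - 1)) ≤ ((cs.length : Int) - pos) - ((tl - t) - 1) := min_le_right _ _
      have h2 : (1 : Int) ≤ max 1 (((cs.length : Int) - pos) - ((tl - t) - 1) * mtl) := le_max_left _ _
      omega
    simp [pvChildren, hw]
  · rw [if_neg hpe]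
    by_cases hpr : ((cs.length : Int) - pos < tl - t ∨ (tl - t) * mtl < (cs.length : Int) - pos)
    · rw [if_pos hpr]
      have hw : pvWindow cs tl mtl t (pos, toks, m) = [] := by
        unfold pvWindow
        apply PySem.List.pyRange_one_eq_nil
        have h1 : min mtl (((cs.length : Int) - pos) - ((tl - t) - 1)) ≤ ((cs.length : Int) - pos) - ((tl - t) - 1) := min_le_right _ _
        have h1' : min mtl (((cs.length : Int) - pos) - ((tl - t) - 1)) ≤ mtl := min_le_left _ _
        have h2 : (1 : Int) ≤ max 1 (((cs.length : Int) - pos) - ((tl - t) - 1) * mtl) := le_max_left _ _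
        have h3 : (((cs.length : Int) - pos) - ((tl - t) - 1) * mtl) ≤ max 1 (((cs.length : Int) - pos) - ((tl - t) - 1) * mtl) := le_max_right _ _
        have hsplit : ((tl - (t : Int)) - 1) * mtl = (tl - t) * mtl - mtl := by ring
        rcases hpr with hpr | hpr
        · omega
        · omega
      simp [pvChildren, hw]
    · rw [if_neg hpr]
      push_neg at hpr
      obtain ⟨hfe1, hfe2⟩ := hpr
      have hrc1 : 1 ≤ (cs.length : Int) - pos := by omega
      have hmtl : 1 ≤ mtl := by
        by_contra hm
        push_neg at hm
        have : (tl - (t : Int)) * mtl ≤ 0 := mul_nonpos_of_nonneg_of_nonpos (by omega) (by omega)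
        omega
      have hb : (fun (acc : List (List String × (List (String × String)))) (l : Int) =>
          match m.lookup (String.ofList ((cs.drop pos).take l.toNat)) with
          | some v =>
            if v = pvLetter t then
              acc ++ pvSolveA cs tl mtl fuel (pos + l.toNat) (t + 1) m (toks ++ [String.ofList ((cs.drop pos).take l.toNat)])
            else acc
          | none =>
            acc ++ pvSolveA cs tl mtl fuel (pos + l.toNat) (t + 1)
              (m ++ [(String.ofList ((cs.drop pos).take l.toNat), pvLetter t)])
              (toks ++ [String.ofList ((cs.drop pos).take l.toNat)]))
          = fun acc l => acc ++ (pvChild cs tl mtl t (pos, toks, m) l).flatMap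
              (fun s' => pvSolveA cs tl mtl fuel s'.1 (t + 1) s'.2.2 s'.2.1) := by
        funext acc l
        simp only [pvChild]
        cases hlk : m.lookup (String.ofList ((cs.drop pos).take l.toNat)) with
        | none => simp
        | some v => by_cases hv : v = pvLetter t <;> simp [hv]
      rw [hb, PySem.List.foldl_append_eq_flatMap, List.nil_append]
      have hsplit : ((tl - (t : Int)) - 1) * mtl = (tl - t) * mtl - mtl := by ring
      have hPge : tl - (t : Int) - 1 ≤ ((tl - t) - 1) * mtl :=
        le_mul_of_one_le_right (by omega) hmtl
      have hM : min (mtl + 1) (((cs.length : Int) - pos) + 1) = min mtl ((cs.length : Int) - pos) + 1 := by omega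
      have hlo1 : (1 : Int) ≤ max 1 (((cs.length : Int) - pos) - ((tl - t) - 1) * mtl) := le_max_left _ _
      have hlomax : ((cs.length : Int) - pos) - ((tl - t) - 1) * mtl ≤ max 1 (((cs.length : Int) - pos) - ((tl - t) - 1) * mtl) := le_max_right _ _
      have hlomax' : max 1 (((cs.length : Int) - pos) - ((tl - t) - 1) * mtl) ≤ max 1 (((cs.length : Int) - pos) - ((tl - t) - 1)) := by
        apply max_le (le_max_left _ _)
        have : ((cs.length : Int) - pos) - ((tl - t) - 1) ≤ max 1 (((cs.length : Int) - pos) - ((tl - t) - 1)) := le_max_right _ _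
        omega
      have hhi1 : min mtl (((cs.length : Int) - pos) - ((tl - t) - 1)) ≤ mtl := min_le_left _ _
      have hhi2 : min mtl (((cs.length : Int) - pos) - ((tl - t) - 1)) ≤ ((cs.length : Int) - pos) - ((tl - t) - 1) := min_le_right _ _
      have hlohi : max 1 (((cs.length : Int) - pos) - ((tl - t) - 1) * mtl) ≤ min mtl (((cs.length : Int) - pos) - ((tl - t) - 1)) + 1 := by
        have hq : (1 : Int) ≤ min mtl (((cs.length : Int) - pos) - ((tl - t) - 1)) := le_min hmtl (by omega)
        have hq2 : ((cs.length : Int) - pos) - ((tl - t) - 1) * mtl ≤ mtl + 1 := by omega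
        have hq3 : ((cs.length : Int) - pos) - ((tl - t) - 1) * mtl ≤ (((cs.length : Int) - pos) - ((tl - t) - 1)) + 1 := by omega
        have := le_min hq2 hq3
        omega
      have hhiM : min mtl (((cs.length : Int) - pos) - ((tl - t) - 1)) + 1 ≤ min mtl ((cs.length : Int) - pos) + 1 := by omega
      rw [hM,
        PySem.List.pyRange_one_append 1 (max 1 (((cs.length : Int) - pos) - ((tl - t) - 1) * mtl)) (min mtl ((cs.length : Int) - pos) + 1) hlo1 (by omega),
        PySem.List.pyRange_one_append (max 1 (((cs.length : Int) - pos) - ((tl - t) - 1) * mtl)) (min mtl (((cs.length : Int) - pos) - ((tl - t) - 1)) + 1) (min mtl ((cs.length : Int) - pos) + 1) hlohi hhiM,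
        List.flatMap_append, List.flatMap_append]
      have hpre : (PySem.List.pyRange 1 (max 1 (((cs.length : Int) - pos) - ((tl - t) - 1) * mtl)) 1).flatMap (fun l =>
          (pvChild cs tl mtl t (pos, toks, m) l).flatMap
            (fun s' => pvSolveA cs tl mtl fuel s'.1 (t + 1) s'.2.2 s'.2.1)) = [] := by
        rw [List.flatMap_congr (g := fun _ => []) ?_]
        · simp
        intro l hl
        rw [PySem.List.mem_pyRange_one] at hl
        have hl1 : (1 : Int) ≤ l := hl.1
        have hllo : l < ((cs.length : Int) - pos) - ((tl - t) - 1) * mtl := by omega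
        have hlt : ((l.toNat : Int)) = l := Int.toNat_of_nonneg (by omega)
        have hdead : ∀ m' toks', pvSolveA cs tl mtl fuel (pos + l.toNat) (t + 1) m' toks' = [] := by
          intro m' toks'
          apply pvSolveA_dead
          by_cases htt : ((t : Int) + 1) = tl
          · refine Or.inr (Or.inl ⟨by push_cast; omega, ?_⟩)
            intro hq
            have : ((pos + l.toNat : Nat) : Int) = (cs.length : Int) := by exact_mod_cast congrArg (Nat.cast (R := Int)) hq
            push_cast [hlt] at this
            omega
          · refine Or.inr (Or.inr ⟨by push_cast; omega, Or.inr ?_⟩)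
            have hc1 : ((pos + l.toNat : Nat) : Int) = (pos : Int) + l := by push_cast [hlt]; ring
            rw [hc1]
            have hring : (tl - ((t : Int) + 1)) * mtl = (tl - (t : Int) - 1) * mtl := by ring
            push_cast
            omega
        simp only [pvChild]
        cases hlk : m.lookup (String.ofList ((cs.drop pos).take l.toNat)) with
        | none => simpa using hdead _ _
        | some v =>
          by_cases hv : v = pvLetter t
          · simpa [hv] using hdead _ _
          · simp [hv]
      have hsuf : (PySem.List.pyRange (min mtl (((cs.length : Int) - pos) - ((tl - t) - 1)) + 1) (min mtl ((cs.length : Int) - pos) + 1) 1).flatMap (fun l =>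
          (pvChild cs tl mtl t (pos, toks, m) l).flatMap
            (fun s' => pvSolveA cs tl mtl fuel s'.1 (t + 1) s'.2.2 s'.2.1)) = [] := by
        rw [List.flatMap_congr (g := fun _ => []) ?_]
        · simp
        intro l hl
        rw [PySem.List.mem_pyRange_one] at hl
        have hlhi : min mtl (((cs.length : Int) - pos) - ((tl - t) - 1)) < l := by omega
        have hlm : l ≤ min mtl ((cs.length : Int) - pos) := by omega
        have hlm1 : l ≤ mtl := le_trans hlm (min_le_left _ _)
        have hlm2 : l ≤ (cs.length : Int) - pos := le_trans hlm (min_le_right _ _)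
        have httne : ¬(((t : Int) + 1) = tl) := by
          intro htt
          have h17 : tl - (t : Int) - 1 = 0 := by omega
          have : min mtl (((cs.length : Int) - pos) - ((tl - t) - 1)) = min mtl ((cs.length : Int) - pos) := by
            rw [(by omega : ((cs.length : Int) - pos) - ((tl - t) - 1) = (cs.length : Int) - pos)]
          omega
        have hl1 : (1 : Int) ≤ l := by omega
        have hlt : ((l.toNat : Int)) = l := Int.toNat_of_nonneg (by omega)
        have hgt : ((cs.length : Int) - pos) - ((tl - t) - 1) < l := by
          rcases min_cases mtl (((cs.length : Int) - pos) - ((tl - t) - 1)) with ⟨hq, hq2⟩ | ⟨hq, hq2⟩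
          · omega
          · omega
        have hdead : ∀ m' toks', pvSolveA cs tl mtl fuel (pos + l.toNat) (t + 1) m' toks' = [] := by
          intro m' toks'
          apply pvSolveA_dead
          refine Or.inr (Or.inr ⟨by push_cast; omega, Or.inl ?_⟩)
          have hc1 : ((pos + l.toNat : Nat) : Int) = (pos : Int) + l := by push_cast [hlt]; ring
          rw [hc1]
          push_cast
          omega
        simp only [pvChild]
        cases hlk : m.lookup (String.ofList ((cs.drop pos).take l.toNat)) with
        | none => simpa using hdead _ _
        | some v =>
          by_cases hv : v = pvLetter t
          · simpa [hv] using hdead _ _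
          · simp [hv]
      rw [hpre, hsuf, List.nil_append, List.append_nil]
      unfold pvChildren pvWindow
      rw [List.flatMap_assoc]

-- children advance pos and stay inside the text
lemma pvChildren_mem (cs : List Char) (tl mtl : Int) (t : Nat)
    (s s' : Nat × List String × List (String × String))
    (hmem : s' ∈ pvChildren cs tl mtl t s) (ht : (t : Int) < tl) (_hp : s.1 ≤ cs.length) :
    s.1 < s'.1 ∧ s'.1 ≤ cs.length := by
  unfold pvChildren pvWindow at hmem
  rw [List.mem_flatMap] at hmem
  obtain ⟨l, hl, hs'⟩ := hmem
  rw [PySem.List.mem_pyRange_one] at hl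
  have hl1 : (1 : Int) ≤ l := le_trans (le_max_left _ _) hl.1
  have hl2 : l ≤ min mtl (((cs.length : Int) - s.1) - ((tl - t) - 1)) := by omega
  have hl3 : l ≤ (cs.length : Int) - s.1 := by
    have := min_le_right mtl (((cs.length : Int) - s.1) - ((tl - t) - 1))
    omega
  have hlt : ((l.toNat : Int)) = l := Int.toNat_of_nonneg (by omega)
  have hpos : s'.1 = s.1 + l.toNat := by
    simp only [pvChild] at hs'
    cases hlk : s.2.2.lookup (String.ofList ((cs.drop s.1).take l.toNat)) with
    | none => rw [hlk] at hs'; simp at hs'; rw [hs']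
    | some v =>
      rw [hlk] at hs'
      by_cases hv : v = pvLetter t
      · simp [hv] at hs'; rw [hs']
      · simp [hv] at hs'
  constructor
  · omega
  · have : ((s.1 + l.toNat : Nat) : Int) ≤ (cs.length : Int) := by push_cast [hlt]; omega
    omega

-- B's loop, finalized, computes the concatenation of A's searches from the frontier
lemma pvMain (cs : List Char) (tl mtl : Int) : ∀ (fuel t : Nat)
    (states : List (Nat × List String × List (String × String))),
    (∀ s ∈ states, s.1 ≤ cs.length ∧ cs.length < s.1 + fuel) →
    (if ((pvLoopB cs tl mtl t states).1 : Int) = tl then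
        (pvLoopB cs tl mtl t states).2.filterMap
          (fun s => if s.1 = cs.length then some (s.2.1, s.2.2) else none)
      else []) =
      states.flatMap (fun s => pvSolveA cs tl mtl fuel s.1 t s.2.2 s.2.1) := by
  intro fuel
  induction fuel with
  | zero =>
    intro t states h
    have hnil : states = [] := by
      cases states with
      | nil => rfl
      | cons s ss =>
        have := h s (List.mem_cons_self)
        omega
    subst hnil
    rw [pvLoopB]
    simp
  | succ fuel ih =>
    intro t states h
    by_cases hc : (t : Int) < tl ∧ states ≠ []
    · rw [pvLoopB, dif_pos hc]
      have hbound : ∀ s' ∈ pvStepB cs tl mtl t states, s'.1 ≤ cs.length ∧ cs.length < s'.1 + fuel := by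
        intro s' hs'
        rw [pvStepB_eq, List.mem_flatMap] at hs'
        obtain ⟨s, hs, hc'⟩ := hs'
        have h1 := pvChildren_mem cs tl mtl t s s' hc' hc.1 (h s hs).1
        have h2 := (h s hs).2
        omega
      rw [ih (t + 1) (pvStepB cs tl mtl t states) hbound, pvStepB_eq, List.flatMap_assoc]
      refine (List.flatMap_congr fun s hs => ?_).symm
      obtain ⟨pos, toks, m⟩ := s
      exact pvExpand cs tl mtl fuel pos t m toks (h _ hs).1 hc.1
    · rw [pvLoopB, dif_neg hc]
      by_cases hst : states = []
      · subst hst; simp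
      · have hge : tl ≤ (t : Int) := by
          by_contra hq
          exact hc ⟨by omega, hst⟩
        by_cases heq : ((t : Nat) : Int) = tl
        · rw [if_pos heq, List.filterMap_eq_flatMap_toList]
          refine List.flatMap_congr fun s hs => ?_
          simp only [pvSolveA, if_pos heq]
          by_cases hsn : s.1 = cs.length <;> simp [hsn]
        · rw [if_neg heq]
          have hz : ∀ s ∈ states, pvSolveA cs tl mtl (fuel + 1) s.1 t s.2.2 s.2.1 = [] :=
            fun s hs => pvSolveA_gt cs tl mtl (fuel + 1) s.1 t s.2.2 s.2.1 (by omega) (h s hs).1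
          rw [List.flatMap_congr (g := fun _ => []) hz]
          simp

-- ===== VERDICT (by name: the statement is the Claim_ definition above) =====
theorem find_consistent_tokenizations_spec : Claim_equal_find_consistent_tokenizations := by
  intro text tl mtl _ _
  unfold Spec_find_consistent_tokenizations find_consistent_tokenizations find_consistent_tokenizations_alt
  have h := pvMain text.toList tl mtl (text.toList.length + 1) 0 [(0, [], [])]
    (by intro s hs; simp at hs; subst hs; omega)
  simp only [List.flatMap_cons, List.flatMap_nil, List.append_nil] at h
  rw [← h]
  by_cases hq : ((pvLoopB text.toList tl mtl 0 [(0, [], [])]).1 : Int) = tl <;> simp [hq]
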